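-- pv_equiv track=rewrite | github.com/gerardroche/sublimefiles | GenerateSyntaxTestAssertions/plugin.py | _build_assertions
-- ===== SOURCE A (Python) =====
-- def _build_assertions(styles, comment_start, comment_end):
--     line_styles_count = len(styles)
--     repeat_count = 0
--     indent_count = 0
--     prev_style = None
--     assertions = []
--     for i, style in enumerate(styles):
--         if style == prev_style:
--             repeat_count += 1
--         else:
--             if prev_style is not None:
--                 assertions.append((indent_count * ' ') + ('^' * repeat_count) + ' ' + prev_style)
--                 indent_count += repeat_count
--                 repeat_count = 1
--             else:
--                 repeat_count += 1
--
--         prev_style = style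
--
--         if line_styles_count == i + 1:
--             assertions.append((indent_count * ' ') + ('^' * repeat_count) + ' ' + prev_style)
--
--     assertions_str = ''
--     for assertion in assertions:
--         assertion = assertion[len(comment_start):]
--         if assertion.lstrip(' ').startswith('^') and assertion.strip(' ^') != '':
--             assertions_str += comment_start + assertion + comment_end + '\n'
--
--     return assertions_str.rstrip('\n')
-- ===== SOURCE B (Python) =====
-- def _build_assertions(styles, comment_start, comment_end):
--     # Single fused pass: each run of equal styles starts at index s (which is
--     # exactly its indent) and extends for k elements; build, filter and wrap
--     # the assertion line immediately, then join with newlines.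
--     prefix_len = len(comment_start)
--     kept = []
--     indent = 0
--     rest = styles
--     while rest:
--         k = 1
--         while k < len(rest) and rest[k] == rest[0]:
--             k += 1
--         body = (' ' * indent + '^' * k + ' ' + rest[0])[prefix_len:]
--         if body.lstrip(' ').startswith('^') and body.strip(' ^') != '':
--             kept.append(comment_start + body + comment_end)
--         indent += k
--         rest = rest[k:]
--     return '\n'.join(kept).rstrip('\n')
-- ===== Notes on version B (the rewrite author's own statement) =====
-- stated objective: simpler
-- what changed: Replaces A's prev_style/repeat_count state machine with its last-element look-ahead and separate filter pass by a single fused pass over runs of equal styles (the run's start index is its indent), filtering/wrapping each line immediately and joining with newlines.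
import Mathlib
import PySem

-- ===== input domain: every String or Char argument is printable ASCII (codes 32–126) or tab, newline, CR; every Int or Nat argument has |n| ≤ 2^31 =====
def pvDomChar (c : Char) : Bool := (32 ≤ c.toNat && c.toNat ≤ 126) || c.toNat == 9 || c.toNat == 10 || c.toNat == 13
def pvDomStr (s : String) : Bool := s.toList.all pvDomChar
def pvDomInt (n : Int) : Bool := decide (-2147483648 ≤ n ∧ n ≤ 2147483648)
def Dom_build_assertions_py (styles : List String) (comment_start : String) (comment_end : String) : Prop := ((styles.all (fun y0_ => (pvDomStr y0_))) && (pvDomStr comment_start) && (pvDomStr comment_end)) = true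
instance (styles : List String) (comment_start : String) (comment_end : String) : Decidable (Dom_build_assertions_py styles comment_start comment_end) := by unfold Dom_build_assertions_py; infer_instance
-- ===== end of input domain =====

-- B replaces A's prev_style/repeat-count state machine (with its last-element
-- look-ahead and separate filter pass) by one fused pass over the runs of equal
-- styles, the run's start index serving directly as its indent; objective: simpler.

-- ===== PORT A =====
-- first loop of A: state (i, repeat_count, indent_count, prev_style, assertions);
-- the `prev_style = style` update and the `line_styles_count == i + 1` check are
-- carried into each branch of the if/else; n is len(styles)
def pyA_loop (n : Nat) (i rc ic : Nat) (prev : Option String) (acc : List (List Char)) : List String → List (List Char)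
  | [] => acc
  | style :: rest =>
    if some style = prev then
      pyA_loop n (i + 1) (rc + 1) ic (some style)
        (if n = i + 1 then acc ++ [List.replicate ic ' ' ++ List.replicate (rc + 1) '^' ++ ' ' :: style.toList] else acc) rest
    else
      match prev with
      | some p =>
        pyA_loop n (i + 1) 1 (ic + rc) (some style)
          (if n = i + 1 then
            (acc ++ [List.replicate ic ' ' ++ List.replicate rc '^' ++ ' ' :: p.toList]) ++
              [List.replicate (ic + rc) ' ' ++ List.replicate 1 '^' ++ ' ' :: style.toList]
          else acc ++ [List.replicate ic ' ' ++ List.replicate rc '^' ++ ' ' :: p.toList]) rest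
      | none =>
        pyA_loop n (i + 1) (rc + 1) ic (some style)
          (if n = i + 1 then acc ++ [List.replicate ic ' ' ++ List.replicate (rc + 1) '^' ++ ' ' :: style.toList] else acc) rest

-- second loop of A; `assertion[len(comment_start):]` is the slice (written out at each
-- use); lstrip(' ') is dropWhile (· == ' ') (exact for a single-char strip set)
def pyA_pass2 (cstart cend : List Char) (acc : List Char) : List (List Char) → List Char
  | [] => acc
  | a :: rest =>
    pyA_pass2 cstart cend
      (if PySem.Chars.startswith ((PySem.List.slice a (some (cstart.length : Int)) none).dropWhile (· == ' ')) ['^'] &&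
          !(PySem.Chars.stripChars (PySem.List.slice a (some (cstart.length : Int)) none) [' ', '^'] == []) then
        acc ++ cstart ++ PySem.List.slice a (some (cstart.length : Int)) none ++ cend ++ ['\n']
      else acc) rest

-- rstrip('\n') ported by hand (exact for a single-char strip set)
def build_assertions_py (styles : List String) (comment_start : String) (comment_end : String) : String :=
  String.ofList (((pyA_pass2 comment_start.toList comment_end.toList []
    (pyA_loop styles.length 0 0 0 none [] styles)).reverse.dropWhile (· == '\n')).reverse)

-- ===== PORT B =====
-- B's single fused pass: the inner while computes the run length k = takeWhile + 1,
-- the run's line is built, filtered and wrapped at once; `rest = rest[k:]` is the drop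
def pyB_go (cstart cend : List Char) (indent : Nat) (rest : List String) (kept : List (List Char)) : List (List Char) :=
  match rest with
  | [] => kept
  | x :: rs =>
    pyB_go cstart cend (indent + ((rs.takeWhile (fun y => y = x)).length + 1)) (rs.drop (rs.takeWhile (fun y => y = x)).length)
      (if PySem.Chars.startswith ((PySem.List.slice
            (List.replicate indent ' ' ++ List.replicate ((rs.takeWhile (fun y => y = x)).length + 1) '^' ++ ' ' :: x.toList)
            (some (cstart.length : Int)) none).dropWhile (· == ' ')) ['^'] &&
          !(PySem.Chars.stripChars (PySem.List.slice
            (List.replicate indent ' ' ++ List.replicate ((rs.takeWhile (fun y => y = x)).length + 1) '^' ++ ' ' :: x.toList)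
            (some (cstart.length : Int)) none) [' ', '^'] == []) then
        kept ++ [cstart ++ PySem.List.slice
            (List.replicate indent ' ' ++ List.replicate ((rs.takeWhile (fun y => y = x)).length + 1) '^' ++ ' ' :: x.toList)
            (some (cstart.length : Int)) none ++ cend]
      else kept)
termination_by rest.length
decreasing_by simp only [List.length_drop, List.length_cons]; omega

-- '\n'.join then rstrip('\n'), as in Source B
def build_assertions_py_alt (styles : List String) (comment_start : String) (comment_end : String) : String :=
  String.ofList (((PySem.Chars.join ['\n']
    (pyB_go comment_start.toList comment_end.toList 0 styles [])).reverse.dropWhile (· == '\n')).reverse)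

-- ===== PRECONDITION & SPEC =====
def Spec_build_assertions_py (styles : List String) (comment_start : String) (comment_end : String) (out : String) : Prop := out = build_assertions_py_alt styles comment_start comment_end
instance (styles : List String) (comment_start : String) (comment_end : String) (out : String) : Decidable (Spec_build_assertions_py styles comment_start comment_end out) := by unfold Spec_build_assertions_py; infer_instance

-- ===== CLAIM (what is proved, stated in full; the proofs are below) =====
def Claim_equal_build_assertions_py : Prop := ∀ (styles : List String) (comment_start : String) (comment_end : String), Dom_build_assertions_py styles comment_start comment_end → Spec_build_assertions_py styles comment_start comment_end (build_assertions_py styles comment_start comment_end)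

-- ===== LEMMAS AND PROOFS =====

-- assertion line for a run: ic blanks, k carets, a blank, the style
def lineL (ic k : Nat) (x : String) : List Char :=
  List.replicate ic ' ' ++ List.replicate k '^' ++ ' ' :: x.toList

-- the run-length decomposition both passes produce
def linesOf (ic : Nat) : List String → List (List Char)
  | [] => []
  | x :: rs =>
    lineL ic ((rs.takeWhile (fun y => y = x)).length + 1) x ::
      linesOf (ic + ((rs.takeWhile (fun y => y = x)).length + 1)) (rs.drop (rs.takeWhile (fun y => y = x)).length)
termination_by l => l.length
decreasing_by simp only [List.length_drop, List.length_cons]; omega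

-- the shared filter/wrap step
def keepF (cstart cend : List Char) (ln : List Char) : Option (List Char) :=
  if PySem.Chars.startswith ((PySem.List.slice ln (some (cstart.length : Int)) none).dropWhile (· == ' ')) ['^'] &&
      !(PySem.Chars.stripChars (PySem.List.slice ln (some (cstart.length : Int)) none) [' ', '^'] == []) then
    some (cstart ++ PySem.List.slice ln (some (cstart.length : Int)) none ++ cend)
  else none

-- A's loop output once a run of p is pending (prev = some p, count rc, indent ic)
def pendL (ic rc : Nat) (p : String) (styles : List String) : List (List Char) :=
  lineL ic (rc + (styles.takeWhile (fun y => y = p)).length) p ::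
    linesOf (ic + rc + (styles.takeWhile (fun y => y = p)).length) (styles.drop (styles.takeWhile (fun y => y = p)).length)

theorem pendL_nil (ic rc : Nat) (p : String) : pendL ic rc p [] = [lineL ic rc p] := by
  simp [pendL, linesOf]

theorem pendL_cons_self (ic rc : Nat) (p : String) (rs : List String) :
    pendL ic rc p (p :: rs) = pendL ic (rc + 1) p rs := by
  unfold pendL
  rw [List.takeWhile_cons_of_pos (by simp)]
  simp only [List.length_cons, List.drop_succ_cons]
  have e1 : rc + ((List.takeWhile (fun y => decide (y = p)) rs).length + 1)
      = rc + 1 + (List.takeWhile (fun y => decide (y = p)) rs).length := by omega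
  have e2 : ic + rc + ((List.takeWhile (fun y => decide (y = p)) rs).length + 1)
      = ic + (rc + 1) + (List.takeWhile (fun y => decide (y = p)) rs).length := by omega
  rw [e1, e2]

theorem pendL_cons_ne (ic rc : Nat) (p st : String) (rest : List String) (hst : st ≠ p) :
    pendL ic rc p (st :: rest) = lineL ic rc p :: linesOf (ic + rc) (st :: rest) := by
  unfold pendL
  rw [List.takeWhile_cons_of_neg (by simp [hst])]
  simp

theorem linesOf_cons_pend (j : Nat) (x : String) (rs : List String) :
    linesOf j (x :: rs) = pendL j 1 x rs := by
  rw [linesOf]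
  unfold pendL
  have e1 : (List.takeWhile (fun y => decide (y = x)) rs).length + 1
      = 1 + (List.takeWhile (fun y => decide (y = x)) rs).length := by omega
  have e2 : j + (1 + (List.takeWhile (fun y => decide (y = x)) rs).length)
      = j + 1 + (List.takeWhile (fun y => decide (y = x)) rs).length := by omega
  rw [e1, e2]

theorem pyA_loop_pend (styles : List String) : ∀ (n i rc ic : Nat) (acc : List (List Char)) (p : String),
    n = i + styles.length → styles ≠ [] →
    pyA_loop n i rc ic (some p) acc styles = acc ++ pendL ic rc p styles := by
  induction styles with
  | nil => intro _ _ _ _ _ _ _ h; exact absurd rfl h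
  | cons st rest ih =>
    intro n i rc ic acc p hn _
    by_cases hst : st = p
    · subst hst
      cases rest with
      | nil =>
        have h1 : n = i + 1 := by simpa using hn
        rw [pyA_loop, if_pos rfl, if_pos h1, pyA_loop, pendL_cons_self, pendL_nil]
        simp [lineL]
      | cons r rs =>
        have hnn : ¬ n = i + 1 := by simp at hn; omega
        have hn' : n = (i + 1) + (r :: rs).length := by simp at hn ⊢; omega
        rw [pyA_loop, if_pos rfl, if_neg hnn, ih n (i+1) (rc+1) ic acc st hn' (by simp),
          pendL_cons_self]
    · cases rest with
      | nil =>
        have h1 : n = i + 1 := by simpa using hn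
        rw [pyA_loop, if_neg (by simpa using hst), if_pos h1, pyA_loop,
          pendL_cons_ne _ _ _ _ _ hst, linesOf_cons_pend, pendL_nil]
        simp [lineL]
      | cons r rs =>
        have hnn : ¬ n = i + 1 := by simp at hn; omega
        have hn' : n = (i + 1) + (r :: rs).length := by simp at hn ⊢; omega
        rw [pyA_loop, if_neg (by simpa using hst), if_neg hnn,
          ih n (i+1) 1 (ic+rc) (acc ++ [List.replicate ic ' ' ++ List.replicate rc '^' ++ ' ' :: p.toList]) st hn' (by simp),
          pendL_cons_ne _ _ _ _ _ hst, linesOf_cons_pend]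
        simp [lineL]

theorem pyA_loop_linesOf (styles : List String) :
    pyA_loop styles.length 0 0 0 none [] styles = linesOf 0 styles := by
  cases styles with
  | nil => simp [pyA_loop, linesOf]
  | cons st rest =>
    rw [pyA_loop, if_neg (by simp)]
    cases rest with
    | nil =>
      rw [if_pos (by simp), pyA_loop, linesOf_cons_pend, pendL_nil]
      simp [lineL]
    | cons r rs =>
      rw [if_neg (by simp), pyA_loop_pend (r :: rs) _ 1 1 0 [] st (by simp; omega) (by simp),
        linesOf_cons_pend]
      simp

theorem pyA_pass2_eq (cstart cend : List Char) : ∀ (lns : List (List Char)) (acc : List Char),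
    pyA_pass2 cstart cend acc lns = acc ++ ((lns.filterMap (keepF cstart cend)).map (· ++ ['\n'])).flatten := by
  intro lns
  induction lns with
  | nil => simp [pyA_pass2]
  | cons a rest ih =>
    intro acc
    rw [pyA_pass2]
    by_cases h : (PySem.Chars.startswith ((PySem.List.slice a (some (cstart.length : Int)) none).dropWhile (· == ' ')) ['^'] &&
        !(PySem.Chars.stripChars (PySem.List.slice a (some (cstart.length : Int)) none) [' ', '^'] == [])) = true
    · rw [if_pos h, ih,
        List.filterMap_cons_some (by rw [keepF, if_pos h] : keepF cstart cend a = some _)]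
      simp
    · rw [if_neg h, ih,
        List.filterMap_cons_none (by rw [keepF, if_neg h] : keepF cstart cend a = none)]

theorem pyB_go_eq (cstart cend : List Char) : ∀ (indent : Nat) (rest : List String) (kept : List (List Char)),
    pyB_go cstart cend indent rest kept = kept ++ (linesOf indent rest).filterMap (keepF cstart cend) := by
  intro indent rest kept
  induction indent, rest, kept using pyB_go.induct (cstart := cstart) (cend := cend) with
  | case1 kept => simp [pyB_go, linesOf]
  | case2 indent kept x rs ih =>
    by_cases h : (PySem.Chars.startswith ((PySem.List.slice
          (List.replicate indent ' ' ++ List.replicate ((rs.takeWhile (fun y => y = x)).length + 1) '^' ++ ' ' :: x.toList)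
          (some (cstart.length : Int)) none).dropWhile (· == ' ')) ['^'] &&
        !(PySem.Chars.stripChars (PySem.List.slice
          (List.replicate indent ' ' ++ List.replicate ((rs.takeWhile (fun y => y = x)).length + 1) '^' ++ ' ' :: x.toList)
          (some (cstart.length : Int)) none) [' ', '^'] == [])) = true
    · rw [dif_pos h] at ih
      rw [pyB_go, if_pos h, ih, linesOf,
        List.filterMap_cons_some (by rw [keepF, lineL, if_pos h] :
          keepF cstart cend (lineL indent ((rs.takeWhile (fun y => y = x)).length + 1) x) = some _)]
      simp
    · rw [dif_neg h] at ih
      rw [pyB_go, if_neg h, ih, linesOf,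
        List.filterMap_cons_none (by rw [keepF, lineL, if_neg h] :
          keepF cstart cend (lineL indent ((rs.takeWhile (fun y => y = x)).length + 1) x) = none)]

-- flatten of newline-terminated pieces vs '\n'.join, up to one trailing '\n'
theorem flatten_map_newline (ks : List (List Char)) (h : ks ≠ []) :
    ((ks.map (· ++ ['\n'])).flatten) = PySem.Chars.join ['\n'] ks ++ ['\n'] := by
  induction ks with
  | nil => exact absurd rfl h
  | cons k ks ih =>
    cases ks with
    | nil => simp [PySem.Chars.join_singleton]
    | cons k' ks' =>
      rw [List.map_cons, List.flatten_cons, ih (by simp), PySem.Chars.join_cons_cons]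
      simp

theorem rstripNl_append_newline (s : List Char) :
    ((s ++ ['\n']).reverse.dropWhile (· == '\n')).reverse = (s.reverse.dropWhile (· == '\n')).reverse := by
  simp

-- ===== VERDICT (by name: the statement is the Claim_ definition above) =====
theorem build_assertions_py_spec : Claim_equal_build_assertions_py := by
  intro styles cstart cend _
  unfold Spec_build_assertions_py build_assertions_py build_assertions_py_alt
  rw [pyA_loop_linesOf, pyA_pass2_eq, pyB_go_eq]
  simp only [List.nil_append]
  by_cases h : (linesOf 0 styles).filterMap (keepF cstart.toList cend.toList) = []
  · rw [h]; simp [PySem.Chars.join, List.intercalate]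
  · rw [flatten_map_newline _ h, rstripNl_append_newline]
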